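-- pv_equiv track=rewrite | github.com/retail-farmer-1997/openreview-scraper | scripts/run_repo_checks.py | expand_checks
-- ===== SOURCE A (Python) =====
-- def expand_checks(requested: list[str]) -> list[str]:
--     expanded: list[str] = []
--     for check in requested:
--         if check == "all":
--             expanded.extend(["guardrails", "tests"])
--         else:
--             expanded.append(check)
--
--     ordered: list[str] = []
--     seen: set[str] = set()
--     for check in expanded:
--         if check not in seen:
--             ordered.append(check)
--             seen.add(check)
--     return ordered
-- ===== SOURCE B (Python) =====
-- def expand_checks(requested: list[str]) -> list[str]:
--     # flatten the alias expansion in one comprehension, then dedup by a shrinking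
--     # worklist: take the front element, drop every copy of it from the rest
--     rest = [name for check in requested
--             for name in (("guardrails", "tests") if check == "all" else (check,))]
--     ordered: list[str] = []
--     while rest:
--         head = rest[0]
--         ordered.append(head)
--         rest = [x for x in rest[1:] if x != head]
--     return ordered
-- ===== Notes on version B (the rewrite author's own statement) =====
-- stated objective: alternative
-- what changed: Replaces A's seen-set scan-and-mark dedup by a comprehension flattening the alias expansion plus a shrinking-worklist dedup that takes the front element and filters every copy of it out of the remaining list (no seen set, no membership test).
import Mathlib
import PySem

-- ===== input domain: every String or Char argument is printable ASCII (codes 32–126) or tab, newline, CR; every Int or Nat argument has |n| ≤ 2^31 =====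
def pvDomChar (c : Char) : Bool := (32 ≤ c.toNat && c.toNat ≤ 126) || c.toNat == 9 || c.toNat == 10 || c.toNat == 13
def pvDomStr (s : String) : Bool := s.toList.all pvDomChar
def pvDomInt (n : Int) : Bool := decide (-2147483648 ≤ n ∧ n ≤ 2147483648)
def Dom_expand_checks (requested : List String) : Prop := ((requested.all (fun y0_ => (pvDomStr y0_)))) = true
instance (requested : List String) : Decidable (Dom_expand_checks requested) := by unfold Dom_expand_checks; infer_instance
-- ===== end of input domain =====

-- B flattens the alias expansion with flatMap and dedups by a shrinking worklist (take the front, filter its copies out of the rest) instead of A's seen-set loops; objective: alternative.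


-- ===== PORT A =====
-- first loop: build 'expanded'; second loop: dedup keeping first occurrences via a seen set
def expand_checks (requested : List String) : List String :=
  let expanded : List String :=
    requested.foldl
      (fun acc check => if check == "all" then acc ++ ["guardrails", "tests"] else acc ++ [check]) []
  (expanded.foldl
      (fun st check =>
        if PySem.Set.contains st.2 check then st
        else (st.1 ++ [check], PySem.Set.add st.2 check))
      ([], PySem.Set.empty)).1

-- ===== PORT B =====
-- worklist dedup: append the front element to 'ordered', drop all its copies from the rest
def pvDedupLoop (ordered : List String) (rest : List String) : List String :=
  match rest with
  | [] => ordered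
  | head :: t => pvDedupLoop (ordered ++ [head]) (t.filter (fun x => !(x == head)))
  termination_by rest.length
  decreasing_by
    simp only [List.length_unattach]
    exact Nat.lt_succ_of_le (le_trans (List.length_filter_le _ _) (by simp))

def expand_checks_alt (requested : List String) : List String :=
  pvDedupLoop []
    (requested.flatMap (fun check =>
      if check == "all" then ["guardrails", "tests"] else [check]))

-- ===== PRECONDITION & SPEC =====
def Spec_expand_checks (requested : List String) (out : List String) : Prop := out = expand_checks_alt requested
instance (requested : List String) (out : List String) : Decidable (Spec_expand_checks requested out) := by unfold Spec_expand_checks; infer_instance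

-- ===== CLAIM (what is proved, stated in full; the proofs are below) =====
def Claim_equal_expand_checks : Prop := ∀ (requested : List String), Dom_expand_checks requested → Spec_expand_checks requested (expand_checks requested)

-- ===== LEMMAS AND PROOFS =====

-- A's dedup step, named for the proofs (same lambda as in the port)
def pvStep (st : List String × PySem.Set String) (name : String) : List String × PySem.Set String :=
  if PySem.Set.contains st.2 name then st
  else (st.1 ++ [name], PySem.Set.add st.2 name)

theorem pvContains_eq (s : PySem.Set String) (x : String) :
    PySem.Set.contains s x = decide (x ∈ s) := by
  simp [PySem.Set.contains]

theorem pvExpand_acc (rs : List String) (acc : List String) :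
    rs.foldl (fun a c => if c == "all" then a ++ ["guardrails", "tests"] else a ++ [c]) acc
      = acc ++ rs.flatMap (fun c => if c == "all" then ["guardrails", "tests"] else [c]) := by
  induction rs generalizing acc with
  | nil => simp
  | cons c rs ih =>
      simp only [List.foldl_cons, List.flatMap_cons, ih]
      split <;> simp

theorem pvContains_add (s : PySem.Set String) (h x : String) :
    PySem.Set.contains (PySem.Set.add s h) x = (PySem.Set.contains s x || x == h) := by
  by_cases hx : x ∈ s <;> by_cases hxh : x = h <;> by_cases hs : h ∈ s <;>
    simp [hx, hxh, hs]

theorem pvFold_dedup (xs : List String) (out : List String) (seen : PySem.Set String) :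
    (xs.foldl pvStep (out, seen)).1
      = pvDedupLoop out (xs.filter (fun x => !(PySem.Set.contains seen x))) := by
  induction hn : xs.length using Nat.strong_induction_on generalizing xs out seen with
  | _ n ih =>
  cases xs with
  | nil => simp [pvDedupLoop]
  | cons h t =>
    by_cases hc : PySem.Set.contains seen h = true
    · have hm : h ∈ seen := by simpa [pvContains_eq] using hc
      have hfc : (h :: t).filter (fun x => !(PySem.Set.contains seen x))
          = t.filter (fun x => !(PySem.Set.contains seen x)) := by
        simp [hm]
      rw [hfc]
      simp only [List.foldl_cons, pvStep, hc, if_true]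
      exact ih t.length (by simp [← hn]) t out seen rfl
    · have hm : h ∉ seen := by simpa [pvContains_eq] using hc
      have hfc : (h :: t).filter (fun x => !(PySem.Set.contains seen x))
          = h :: t.filter (fun x => !(PySem.Set.contains seen x)) := by
        simp [hm]
      rw [hfc]
      simp only [List.foldl_cons, pvStep, hc, if_false, Bool.false_eq_true]
      rw [ih t.length (by simp [← hn]) t (out ++ [h]) (PySem.Set.add seen h) rfl]
      have hff : t.filter (fun x => !(PySem.Set.contains (PySem.Set.add seen h) x))
          = (t.filter (fun x => !(PySem.Set.contains seen x))).filter (fun x => !(x == h)) := by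
        rw [List.filter_filter]
        apply List.filter_congr
        intro x _
        rw [pvContains_add]
        cases hxs : PySem.Set.contains seen x <;> cases hxh : x == h <;> simp
      rw [hff]
      conv_rhs => rw [pvDedupLoop]

theorem pvFilter_empty (xs : List String) :
    xs.filter (fun x => !(PySem.Set.contains PySem.Set.empty x)) = xs := by
  apply List.filter_eq_self.mpr
  intro x _
  simp [PySem.Set.empty]

-- ===== VERDICT (by name: the statement is the Claim_ definition above) =====
theorem expand_checks_spec : Claim_equal_expand_checks := by
  intro requested _
  show expand_checks requested = expand_checks_alt requested
  unfold expand_checks expand_checks_alt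
  rw [pvExpand_acc, List.nil_append]
  have h := pvFold_dedup
    (requested.flatMap (fun c => if c == "all" then ["guardrails", "tests"] else [c]))
    [] PySem.Set.empty
  rw [pvFilter_empty] at h
  exact h
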